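-- pv_equiv track=rewrite | github.com/wuxiyang1996/Video_Skills | paper_analyses/p8_candy_crush_diplomacy_case_study.py | _extract_action_text
-- ===== SOURCE A (Python) =====
-- def _extract_action_text(prompt, completion):
--     action_num = "?"
--     for line in completion.split("\n"):
--         if line.strip().startswith("ACTION:"):
--             action_num = line.strip().split(":")[1].strip()
--             break
--     if "Available actions" not in prompt:
--         return action_num, "?"
--     for line in prompt.split("Available actions")[1].split("\n"):
--         line = line.strip()
--         if line.startswith(f"{action_num}."):
--             return action_num, line.split(".", 1)[1].strip()
--     return action_num, "?"
-- ===== SOURCE B (Python) =====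
-- def _extract_action_text(prompt, completion):
--     action_num = next((l.strip().split(":")[1].strip()
--                        for l in completion.split("\n")
--                        if l.strip().startswith("ACTION:")), "?")
--     if "Available actions" not in prompt:
--         return action_num, "?"
--     options = {}
--     for line in prompt.split("Available actions")[1].split("\n"):
--         s = line.strip()
--         if "." in s:
--             key, rest = s.split(".", 1)
--             if key not in options:
--                 options[key] = rest.strip()
--     return action_num, options.get(action_num, "?")
-- ===== Notes on version B (the rewrite author's own statement) =====
-- stated objective: alternative
-- what changed: B replaces A's second scan-until-return loop with a dict built in one pass over the option lines (number -> description, first occurrence wins) followed by a single lookup, and takes the action number via next() over a generator instead of a break-loop; Pre_ excludes completions whose ACTION label itself contains a '.', an unspecified corner where A splits the matched line at the first dot inside the label while B's index keyed on the text before the first dot finds no entry.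
-- outside the precondition, e.g. on _extract_action_text('Available actions\n1.5. go', 'ACTION: 1.5'): A returns ('1.5', '5. go'), B returns ('1.5', '?')
import Mathlib
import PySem

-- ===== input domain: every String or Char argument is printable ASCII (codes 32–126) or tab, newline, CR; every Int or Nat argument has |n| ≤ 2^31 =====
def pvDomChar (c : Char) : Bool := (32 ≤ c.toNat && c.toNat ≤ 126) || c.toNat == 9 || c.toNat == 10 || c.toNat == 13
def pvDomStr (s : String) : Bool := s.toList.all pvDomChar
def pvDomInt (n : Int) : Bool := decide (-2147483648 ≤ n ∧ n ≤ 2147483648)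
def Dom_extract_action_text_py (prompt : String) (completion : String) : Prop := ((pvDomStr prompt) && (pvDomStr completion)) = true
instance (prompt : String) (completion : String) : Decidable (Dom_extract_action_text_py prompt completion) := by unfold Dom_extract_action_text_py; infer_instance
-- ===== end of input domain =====

-- B replaces A's second scan-until-return loop by an index: one pass builds a dict of option
-- number -> description (first occurrence wins), then the answer is a single lookup; objective: alternative.
-- Pre_ excludes completions whose ACTION label itself contains a '.', an unspecified corner where
-- A's split-at-first-dot and B's dict keyed on the text before the first dot are both accidental readings.


-- ===== PORT A =====
-- `s.split(sep)` for a non-empty literal sep: PySem.Str.split? is `some` exactly when sep ≠ "",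
-- so `.getD []` is exact at every call site below (seps "\n", ":", "Available actions").
def pvSplit (s sep : String) : List String := (PySem.Str.split? s sep).getD []

-- `line.strip().split(":")[1].strip()`; index 1 exists because the stripped line starts with
-- "ACTION:", so `.getD 1 ""` is exact here.
def pvNumOfLine (l : String) : String :=
  PySem.Str.strip ((pvSplit (PySem.Str.strip l) ":").getD 1 "")

-- `line.split(".", 1)[1].strip()`; index 1 exists because the line starts with `num ++ "."`.
def pvDescOfLine (s : String) : String :=
  PySem.Str.strip (((PySem.Str.splitMax? s "." 1).getD []).getD 1 "")

-- first loop of A: scan completion lines, break on the first "ACTION:" line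
def pvAFindNum : List String → String
  | [] => "?"
  | l :: rest =>
    if PySem.Str.startswith (PySem.Str.strip l) "ACTION:" then pvNumOfLine l
    else pvAFindNum rest

-- second loop of A: scan the prompt section lines, return on the first "num." line
def pvAFindDesc (num : String) : List String → String × String
  | [] => (num, "?")
  | l :: rest =>
    let s := PySem.Str.strip l
    if PySem.Str.startswith s (num ++ ".") then (num, pvDescOfLine s)
    else pvAFindDesc num rest

def extract_action_text_py (prompt : String) (completion : String) : String × String :=
  let action_num := pvAFindNum (pvSplit completion "\n")
  if PySem.Str.isIn "Available actions" prompt = false then (action_num, "?")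
  else
    -- `prompt.split("Available actions")[1]`: index 1 exists since the separator occurs in prompt
    pvAFindDesc action_num
      (pvSplit ((pvSplit prompt "Available actions").getD 1 "") "\n")

-- ===== PORT B =====
-- one step of B's dict-building loop: `if "." in s: key, rest = s.split(".", 1);
-- if key not in options: options[key] = rest.strip()` (unpacking is exact: the split has 2 parts)
def pvAddOption (d : PySem.Dict String String) (line : String) : PySem.Dict String String :=
  let s := PySem.Str.strip line
  if PySem.Str.isIn "." s then
    let parts := (PySem.Str.splitMax? s "." 1).getD []
    let key := parts.getD 0 ""
    if d.contains key then d else d.insert key (PySem.Str.strip (parts.getD 1 ""))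
  else d

def extract_action_text_py_alt (prompt : String) (completion : String) : String × String :=
  -- `next((... for l in ... if ...), "?")`: first line passing the filter, mapped, default "?"
  let action_num := ((pvSplit completion "\n").findSome? (fun l =>
      if PySem.Str.startswith (PySem.Str.strip l) "ACTION:" then some (pvNumOfLine l)
      else none)).getD "?"
  if PySem.Str.isIn "Available actions" prompt then
    let options := (pvSplit ((pvSplit prompt "Available actions").getD 1 "") "\n").foldl
        pvAddOption PySem.Dict.empty
    (action_num, options.getD action_num "?")
  else (action_num, "?")

-- ===== PRECONDITION & SPEC =====
-- Pre_ excludes inputs whose completion has an "ACTION:" line whose extracted label contains a '.':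
-- there A keys its match on the label followed by a dot but still splits the option line at its FIRST
-- dot (inside the label), while B's index keyed on the text before the first dot finds no entry —
-- an unspecified corner where both values are accidental.
def Pre_extract_action_text_py (prompt : String) (completion : String) : Prop :=
  ∀ l ∈ (PySem.Str.split? completion "\n").getD [],
    PySem.Str.startswith (PySem.Str.strip l) "ACTION:" = true →
    PySem.Str.isIn "."
      (PySem.Str.strip (((PySem.Str.split? (PySem.Str.strip l) ":").getD []).getD 1 "")) = false
instance (prompt : String) (completion : String) : Decidable (Pre_extract_action_text_py prompt completion) := by unfold Pre_extract_action_text_py; infer_instance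

def pvWitness_extract_action_text_py : String × String :=
  ("Available actions:\n1. hold\n2. move north", "I choose.\nACTION: 2")

def Spec_extract_action_text_py (prompt : String) (completion : String) (out : String × String) : Prop := out = extract_action_text_py_alt prompt completion
instance (prompt : String) (completion : String) (out : String × String) : Decidable (Spec_extract_action_text_py prompt completion out) := by unfold Spec_extract_action_text_py; infer_instance

-- ===== CLAIM (what is proved, stated in full; the proofs are below) =====
def Claim_equal_extract_action_text_py : Prop := ∀ (prompt : String) (completion : String), Dom_extract_action_text_py prompt completion → Pre_extract_action_text_py prompt completion → Spec_extract_action_text_py prompt completion (extract_action_text_py prompt completion)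

-- ===== LEMMAS AND PROOFS =====

-- `s.split(".", 1)` characterised: once the maxsplit budget is 0 the rest is one piece …
theorem pv_go_zero (fuel : Nat) (l cur : List Char) (acc : List (List Char)) :
    PySem.Chars.splitOnMax.go ['.'] fuel 0 l cur acc = ((cur.reverse ++ l) :: acc).reverse := by
  rw [PySem.Chars.splitOnMax.go.eq_def]
  cases fuel with
  | zero => simp
  | succ f => cases l with
    | nil => simp
    | cons c rest => simp

-- … and with budget 1 the scan cuts at the first '.' if any
theorem pv_go_one (l : List Char) : ∀ (fuel : Nat) (cur : List Char) (acc : List (List Char)),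
    l.length < fuel →
    PySem.Chars.splitOnMax.go ['.'] fuel 1 l cur acc =
      acc.reverse ++ (if '.' ∈ l then
          [cur.reverse ++ l.takeWhile (· != '.'), (l.dropWhile (· != '.')).tail]
        else [cur.reverse ++ l]) := by
  induction l with
  | nil =>
    intro fuel cur acc h
    rw [PySem.Chars.splitOnMax.go.eq_def]
    cases fuel with
    | zero => omega
    | succ f => simp
  | cons c rest ih =>
    intro fuel cur acc h
    cases fuel with
    | zero => omega
    | succ f =>
      rw [PySem.Chars.splitOnMax.go.eq_def]
      by_cases hc : c = '.'
      · subst hc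
        have hpre : List.isPrefixOf ['.'] ('.' :: rest) = true := by simp [List.isPrefixOf]
        simp only [hpre, if_true, reduceCtorEq]
        simp [pv_go_zero, List.takeWhile, List.dropWhile]
      · have hpre : List.isPrefixOf ['.'] (c :: rest) = false := by
          simp [List.isPrefixOf]; exact fun h' => (hc h'.symm).elim
        simp only [hpre, reduceCtorEq, if_false, Bool.false_eq_true]
        rw [ih f (c :: cur) acc (by simpa using Nat.lt_of_succ_lt_succ h)]
        have hb : (c != '.') = true := by simpa using hc
        have hne : ¬ '.' = c := fun h => hc h.symm
        simp [hb, hne]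

theorem pv_splitOnMax_dot_one (cs : List Char) :
    PySem.Chars.splitOnMax cs ['.'] 1 =
      if '.' ∈ cs then [cs.takeWhile (· != '.'), (cs.dropWhile (· != '.')).tail] else [cs] := by
  rw [PySem.Chars.splitOnMax]
  rw [if_neg (by omega)]
  simp only [Int.toNat_one]
  rw [pv_go_one cs (cs.length + 1) [] [] (by omega)]
  simp

-- dot-free `num`: `s.startswith(num + ".")` ≡ '.' occurs in s and the text before the first '.' is num
theorem pv_startswith_dot_iff (num cs : List Char) (hnum : '.' ∉ num) :
    (num ++ ['.']).isPrefixOf cs = true ↔ ('.' ∈ cs ∧ cs.takeWhile (· != '.') = num) := by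
  rw [List.isPrefixOf_iff_prefix]
  constructor
  · rintro ⟨t, ht⟩
    subst ht
    have hall : ∀ c ∈ num, (c != '.') = true := by
      intro c hcm
      simp only [bne_iff_ne, ne_eq]
      intro h
      exact hnum (h ▸ hcm)
    constructor
    · simp
    · rw [List.append_assoc]
      rw [List.takeWhile_append_of_pos hall]
      simp
  · rintro ⟨hmem, htw⟩
    have hsplit := List.takeWhile_append_dropWhile (p := (· != '.')) (l := cs)
    have hdw : cs.dropWhile (· != '.') ≠ [] := by
      intro hnil
      rw [← hsplit, hnil, List.append_nil] at hmem
      have := List.mem_takeWhile_imp hmem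
      simp at this
    obtain ⟨d, t, hdt⟩ := List.exists_cons_of_ne_nil hdw
    have hd : d = '.' := by
      have := List.head_dropWhile_not (p := (· != '.')) (l := cs) hdw
      simp only [hdt, List.head_cons] at this
      simpa using this
    refine ⟨t, ?_⟩
    rw [List.append_assoc]
    rw [← hsplit, htw, hdt, hd]
    simp

-- '.' in s, on the String side
theorem pv_isIn_dot (s : String) : PySem.Str.isIn "." s = true ↔ '.' ∈ s.toList := by
  rw [PySem.Str.isIn_iff_infix]
  have h1 : (".").toList = ['.'] := rfl
  rw [h1]
  exact List.singleton_infix_iff '.' s.toList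

-- the two parts of `s.split(".", 1)` when '.' occurs in s
theorem pv_parts_eq (s : String) (h : '.' ∈ s.toList) :
    (PySem.Str.splitMax? s "." 1).getD [] =
      [String.ofList (s.toList.takeWhile (· != '.')),
       String.ofList ((s.toList.dropWhile (· != '.')).tail)] := by
  rw [PySem.Str.splitMax?]
  have h1 : (".").toList = ['.'] := rfl
  rw [h1, PySem.Chars.splitMax?]
  rw [if_neg (by simp)]
  rw [pv_splitOnMax_dot_one, if_pos h]
  simp

theorem pv_startswith_str (num s : String) (hnum : '.' ∉ num.toList) :
    (PySem.Str.startswith s (num ++ ".") = true) ↔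
      ('.' ∈ s.toList ∧ String.ofList (s.toList.takeWhile (· != '.')) = num) := by
  rw [PySem.Str.startswith_eq]
  have h1 : (num ++ ".").toList = num.toList ++ ['.'] := by rw [String.toList_append]; rfl
  rw [h1, PySem.Chars.startswith, pv_startswith_dot_iff num.toList s.toList hnum]
  constructor
  · rintro ⟨hm, ht⟩
    exact ⟨hm, by rw [ht, String.ofList_toList]⟩
  · rintro ⟨hm, ht⟩
    refine ⟨hm, ?_⟩
    have := congrArg String.toList ht
    rwa [String.toList_ofList] at this

-- B's first-match generator is A's break loop
theorem pv_findNum_eq (ls : List String) :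
    ((ls.findSome? (fun l =>
        if PySem.Str.startswith (PySem.Str.strip l) "ACTION:" then some (pvNumOfLine l)
        else none)).getD "?") = pvAFindNum ls := by
  induction ls with
  | nil => rfl
  | cons l rest ih =>
    simp only [List.findSome?_cons, pvAFindNum]
    cases h : PySem.Str.startswith (PySem.Str.strip l) "ACTION:" with
    | true => simp
    | false => simpa using ih

-- under Pre_, the action number A finds is dot-free
theorem pv_num_dotfree (ls : List String)
    (h : ∀ l ∈ ls, PySem.Str.startswith (PySem.Str.strip l) "ACTION:" = true →
      PySem.Str.isIn "."
        (PySem.Str.strip (((PySem.Str.split? (PySem.Str.strip l) ":").getD []).getD 1 "")) = false) :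
    '.' ∉ (pvAFindNum ls).toList := by
  induction ls with
  | nil => simp [pvAFindNum]
  | cons l rest ih =>
    by_cases hs : PySem.Str.startswith (PySem.Str.strip l) "ACTION:" = true
    · have := h l (by simp) hs
      simp only [pvAFindNum, hs, if_true]
      intro hmem
      rw [← pv_isIn_dot (pvNumOfLine l)] at hmem
      simp only [pvNumOfLine, pvSplit] at hmem
      rw [this] at hmem
      exact Bool.false_ne_true hmem
    · simp only [pvAFindNum, hs, if_false, Bool.false_eq_true]
      exact ih (fun l' hl' => h l' (by simp [hl']))

def pvKey (s : String) : String := String.ofList (s.toList.takeWhile (· != '.'))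

-- the dict built by B answers exactly what A's scan loop answers (fresh keys only: first match wins)
theorem pv_build_getD (num : String) (hnum : '.' ∉ num.toList) :
    ∀ (ls : List String) (d : PySem.Dict String String),
      (ls.foldl pvAddOption d).getD num "?" =
        if d.contains num then d.getD num "?" else (pvAFindDesc num ls).2 := by
  intro ls
  induction ls with
  | nil =>
    intro d
    by_cases hc : d.contains num
    · simp [hc]
    · simp only [List.foldl_nil, pvAFindDesc, hc, Bool.false_eq_true, if_false]
      exact PySem.Dict.getD_of_not_contains d "?" (by simpa using hc)
  | cons l rest ih =>
    intro d
    simp only [List.foldl_cons]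
    by_cases hin : PySem.Str.isIn "." (PySem.Str.strip l) = true
    · have hmem : '.' ∈ (PySem.Str.strip l).toList := (pv_isIn_dot _).mp hin
      have hparts := pv_parts_eq (PySem.Str.strip l) hmem
      by_cases hk : pvKey (PySem.Str.strip l) = num
      · have hsw : PySem.Str.startswith (PySem.Str.strip l) (num ++ ".") = true :=
          (pv_startswith_str num _ hnum).mpr ⟨hmem, hk⟩
        have hdesc : pvAFindDesc num (l :: rest) = (num, pvDescOfLine (PySem.Str.strip l)) := by
          simp only [pvAFindDesc, hsw]
          simp
        have hstep : pvAddOption d l =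
            if d.contains num then d
            else d.insert num (PySem.Str.strip
              (String.ofList ((PySem.Str.strip l).toList.dropWhile (· != '.')).tail)) := by
          simp only [pvAddOption, hin, if_true, hparts]
          rw [show ([String.ofList ((PySem.Str.strip l).toList.takeWhile (· != '.')),
              String.ofList (((PySem.Str.strip l).toList.dropWhile (· != '.')).tail)].getD 0 "") =
              pvKey (PySem.Str.strip l) from rfl, hk]
          rfl
        by_cases hc : d.contains num
        · rw [hstep, if_pos hc, ih d, if_pos hc, if_pos hc]
        · rw [hstep, if_neg hc, ih _, if_pos (PySem.Dict.contains_insert_self _ _ _),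
            PySem.Dict.getD_insert_self, if_neg hc, hdesc]
          simp only [pvDescOfLine, hparts]
          rfl
      · have hsw : PySem.Str.startswith (PySem.Str.strip l) (num ++ ".") = false := by
          cases hb : PySem.Str.startswith (PySem.Str.strip l) (num ++ ".") with
          | false => rfl
          | true => exact absurd ((pv_startswith_str num _ hnum).mp hb).2 hk
        have hdesc : pvAFindDesc num (l :: rest) = pvAFindDesc num rest := by
          simp only [pvAFindDesc, hsw]
          simp
        have hstep : pvAddOption d l =
            if d.contains (pvKey (PySem.Str.strip l)) then d
            else d.insert (pvKey (PySem.Str.strip l)) (PySem.Str.strip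
              (String.ofList ((PySem.Str.strip l).toList.dropWhile (· != '.')).tail)) := by
          simp only [pvAddOption, hin, if_true, hparts]
          rfl
        have hne : num ≠ pvKey (PySem.Str.strip l) := fun h => hk h.symm
        rw [hstep, hdesc]
        by_cases hc : d.contains (pvKey (PySem.Str.strip l))
        · rw [if_pos hc, ih d]
        · rw [if_neg hc, ih _]
          rw [PySem.Dict.contains_insert]
          have hbeq : (num == pvKey (PySem.Str.strip l)) = false := by
            simpa using hne
          rw [hbeq, Bool.false_or, PySem.Dict.getD_insert_of_ne _ _ _ hne]
    · have hinb : PySem.Str.isIn "." (PySem.Str.strip l) = false := by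
        simpa using hin
      have hstep : pvAddOption d l = d := by
        simp only [pvAddOption, hinb, Bool.false_eq_true, if_false]
      have hsw : PySem.Str.startswith (PySem.Str.strip l) (num ++ ".") = false := by
        cases hb : PySem.Str.startswith (PySem.Str.strip l) (num ++ ".") with
        | false => rfl
        | true =>
          have hm := ((pv_startswith_str num _ hnum).mp hb).1
          rw [← pv_isIn_dot] at hm
          exact absurd hm hin
      have hdesc : pvAFindDesc num (l :: rest) = pvAFindDesc num rest := by
        simp only [pvAFindDesc, hsw]
        simp
      rw [hstep, hdesc, ih d]

theorem pv_fst_findDesc (num : String) (ls : List String) : (pvAFindDesc num ls).1 = num := by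
  induction ls with
  | nil => rfl
  | cons l rest ih =>
    simp only [pvAFindDesc]
    split
    · rfl
    · exact ih

-- ===== VERDICT (by name: the statement is the Claim_ definition above) =====
theorem extract_action_text_py_spec : Claim_equal_extract_action_text_py := by
  intro prompt completion _ hpre
  unfold Spec_extract_action_text_py extract_action_text_py extract_action_text_py_alt
  have hnum : '.' ∉ (pvAFindNum (pvSplit completion "\n")).toList :=
    pv_num_dotfree _ (by unfold Pre_extract_action_text_py at hpre; exact hpre)
  rw [pv_findNum_eq]
  cases h : PySem.Str.isIn "Available actions" prompt with
  | false => simp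
  | true =>
    simp only [Bool.true_eq_false, if_false, if_true]
    have := pv_build_getD (pvAFindNum (pvSplit completion "\n")) hnum
      (pvSplit ((pvSplit prompt "Available actions").getD 1 "") "\n") PySem.Dict.empty
    rw [PySem.Dict.contains_empty, if_neg (by simp)] at this
    rw [this]
    exact (Prod.ext (pv_fst_findDesc _ _) rfl)
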